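-- pv_equiv track=rewrite | github.com/AISL-1-2425-C4/BusOccupancySystem | frontend_api_simple.py | merge_seating_layouts
-- ===== SOURCE A (Python) =====
-- from collections import Counter
--
-- def merge_seating_layouts(layouts: list[dict]) -> dict:
--     """
--     Merge multiple seating layouts by majority vote on class_id.
--     Keeps coordinates from the most recent layout.
--     """
--     if not layouts:
--         return {}
--
--     # Use the most recent layout as the base (so we keep coords/structure)
--     base_layout = layouts[0]
--
--     merged = {}
--
--     for row, cols in base_layout.items():
--         merged[row] = {}
--         for col, seat_info in cols.items():
--             # Collect all class_id values for this seat across all layouts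
--             class_ids = []
--             coords = seat_info.get("coordinates", {})
--             for layout in layouts:
--                 try:
--                     seat = layout[row][col]
--                     class_ids.append(seat["class_id"])
--                 except KeyError:
--                     continue  # skip if missing in that layout
--
--             if class_ids:
--                 # Majority vote
--                 most_common = Counter(class_ids).most_common(1)[0][0]
--             else:
--                 most_common = seat_info["class_id"]  # fallback
--
--             merged[row][col] = {
--                 "class_id": most_common,
--                 "coordinates": coords,  # preserve coords from latest
--             }
--
--     return merged
-- ===== SOURCE B (Python) =====
-- from collections import Counter
--
-- def merge_seating_layouts(layouts: list[dict]) -> dict: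
--     """
--     Merge seating layouts by per-seat majority vote on class_id.
--     Single vote-collection pass over all layouts into a per-(row, col)
--     Counter dict, then one pass over the base layout to build the output.
--     """
--     if not layouts:
--         return {}
--
--     votes = {}
--     for layout in layouts:
--         for row, cols in layout.items():
--             for col, seat in cols.items():
--                 try:
--                     cid = seat["class_id"]
--                 except KeyError:
--                     continue
--                 votes.setdefault((row, col), Counter())[cid] += 1
--
--     merged = {}
--     for row, cols in layouts[0].items():
--         merged[row] = {}
--         for col, seat_info in cols.items():
--             ctr = votes.get((row, col))
--             if ctr:
--                 mc = ctr.most_common(1)[0][0]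
--             else:
--                 mc = seat_info["class_id"]
--             merged[row][col] = {
--                 "class_id": mc,
--                 "coordinates": seat_info.get("coordinates", {}),
--             }
--     return merged
-- ===== Notes on version B (the rewrite author's own statement) =====
-- stated objective: faster
-- what changed: A rescans every layout once per seat of the base layout; B makes a single vote-collection pass over all layouts into a per-(row,col) Counter dict and then one pass over the base layout, reading each seat's majority from the precomputed dict.
import Mathlib
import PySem

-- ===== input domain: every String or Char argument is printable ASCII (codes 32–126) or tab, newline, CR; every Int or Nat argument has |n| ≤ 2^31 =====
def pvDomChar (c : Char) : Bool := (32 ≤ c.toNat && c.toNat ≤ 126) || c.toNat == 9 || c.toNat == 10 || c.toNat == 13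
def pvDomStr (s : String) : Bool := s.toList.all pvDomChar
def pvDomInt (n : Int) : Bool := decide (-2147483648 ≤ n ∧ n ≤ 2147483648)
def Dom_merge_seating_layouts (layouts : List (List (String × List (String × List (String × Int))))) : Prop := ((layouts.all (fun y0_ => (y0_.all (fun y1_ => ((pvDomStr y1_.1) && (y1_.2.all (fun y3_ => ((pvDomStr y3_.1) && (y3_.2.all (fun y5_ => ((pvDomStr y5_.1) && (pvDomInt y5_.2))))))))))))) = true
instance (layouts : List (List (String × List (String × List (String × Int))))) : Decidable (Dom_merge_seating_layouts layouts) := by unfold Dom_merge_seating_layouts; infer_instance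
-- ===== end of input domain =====

-- B replaces A's per-seat rescan of every layout by one vote-collection pass over all
-- layouts into a per-(row, col) Counter dict, then a single pass over the base layout
-- (objective: faster — one traversal of the data instead of one per base seat).

-- ===== PORT A =====

-- first-match association-list lookup = Python dict[key] / dict.get(key) on the dict encoding
def pvLookup {β : Type} : List (String × β) → String → Option β
  | [], _ => none
  | (k, v) :: t, x => if k == x then some v else pvLookup t x

-- the class_ids-collection loop of A: 'for layout in layouts: try: ... except KeyError: continue'
def pvIds (layouts : List (List (String × List (String × List (String × Int))))) (row col : String) : List Int :=
  layouts.foldl (fun acc layout =>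
    match pvLookup layout row with
    | none => acc
    | some cols =>
      match pvLookup cols col with
      | none => acc
      | some seat =>
        match pvLookup seat "class_id" with
        | none => acc
        | some cid => acc ++ [cid]) []

-- Counter.most_common(1)[0][0]: first key (in insertion order) of maximal count.
-- The [] case is unreachable in both ports (Python would raise IndexError there).
def pvMostCommon1 (d : PySem.Dict Int Int) : Int :=
  match d.items with
  | [] => 0
  | p :: rest => (rest.foldl (fun b q => if q.2 > b.2 then q else b) p).1

-- Pre_ guarantees every base seat carries "class_id" and "coordinates", so the
-- '.getD 0' defaults below (where Python would raise KeyError / return {}) are never taken.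
def merge_seating_layouts (layouts : List (List (String × List (String × List (String × Int))))) : List (String × List (String × List (String × Int))) :=
  match layouts with
  | [] => []
  | base :: _ =>
    base.foldl (fun merged rc =>
      merged ++ [(rc.1,
        rc.2.foldl (fun mrow cs =>
          let coords := (pvLookup cs.2 "coordinates").getD 0
          let classIds := pvIds layouts rc.1 cs.1
          let mostCommon :=
            if classIds ≠ [] then pvMostCommon1 (PySem.Dict.counter classIds)
            else (pvLookup cs.2 "class_id").getD 0
          mrow ++ [(cs.1, [("class_id", mostCommon), ("coordinates", coords)])]) [])]) []

-- ===== PORT B =====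

-- first pass of B: votes.setdefault((row, col), Counter())[cid] += 1 over every layout
def pvVotes (layouts : List (List (String × List (String × List (String × Int))))) : PySem.Dict (String × String) (PySem.Dict Int Int) :=
  layouts.foldl (fun v layout =>
    layout.foldl (fun v rc =>
      rc.2.foldl (fun v cs =>
        match pvLookup cs.2 "class_id" with
        | none => v
        | some cid => v.modify (rc.1, cs.1) PySem.Dict.empty (fun c => c.modify cid 0 (· + 1))) v) v) PySem.Dict.empty

def merge_seating_layouts_alt (layouts : List (List (String × List (String × List (String × Int))))) : List (String × List (String × List (String × Int))) :=
  match layouts with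
  | [] => []
  | base :: _ =>
    let votes := pvVotes layouts
    base.foldl (fun merged rc =>
      merged ++ [(rc.1,
        rc.2.foldl (fun mrow cs =>
          let mostCommon :=
            match votes.get? (rc.1, cs.1) with
            | some ctr => if ctr.size ≠ 0 then pvMostCommon1 ctr else (pvLookup cs.2 "class_id").getD 0
            | none => (pvLookup cs.2 "class_id").getD 0
          mrow ++ [(cs.1, [("class_id", mostCommon), ("coordinates", (pvLookup cs.2 "coordinates").getD 0)])]) [])]) []

-- ===== PRECONDITION & SPEC =====
-- Pre_ restricts to faithful dict encodings (unique keys at every level; Python dicts cannot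
-- hold duplicates) and requires every seat of the base layout to carry "coordinates" (else A
-- returns the dict {} where an int is expected, outside the declared type) and to have a
-- "class_id" vote in at least one layout (else A's fallback raises KeyError).
def Pre_merge_seating_layouts (layouts : List (List (String × List (String × List (String × Int))))) : Prop :=
  (∀ layout ∈ layouts, (layout.map Prod.fst).Nodup ∧
     ∀ rc ∈ layout, (rc.2.map Prod.fst).Nodup ∧ ∀ cs ∈ rc.2, (cs.2.map Prod.fst).Nodup) ∧
  (∀ base ∈ layouts.take 1, ∀ rc ∈ base, ∀ cs ∈ rc.2,
     "coordinates" ∈ cs.2.map Prod.fst ∧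
     ∃ layout ∈ layouts, ∃ rc' ∈ layout, rc'.1 = rc.1 ∧
       ∃ cs' ∈ rc'.2, cs'.1 = cs.1 ∧ "class_id" ∈ cs'.2.map Prod.fst)

instance (layouts : List (List (String × List (String × List (String × Int))))) : Decidable (Pre_merge_seating_layouts layouts) := by unfold Pre_merge_seating_layouts; infer_instance

def pvWitness_merge_seating_layouts : (List (List (String × List (String × List (String × Int))))) :=
  [[("r1", [("c1", [("class_id", 1), ("coordinates", 7)])])],
   [("r1", [("c1", [("class_id", 2)])])],
   [("r1", [("c1", [("class_id", 2)])])]]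

def Spec_merge_seating_layouts (layouts : List (List (String × List (String × List (String × Int))))) (out : List (String × List (String × List (String × Int)))) : Prop := out = merge_seating_layouts_alt layouts
instance (layouts : List (List (String × List (String × List (String × Int))))) (out : List (String × List (String × List (String × Int)))) : Decidable (Spec_merge_seating_layouts layouts out) := by unfold Spec_merge_seating_layouts; infer_instance

-- ===== CLAIM (what is proved, stated in full; the proofs are below) =====
def Claim_equal_merge_seating_layouts : Prop := ∀ (layouts : List (List (String × List (String × List (String × Int))))), Dom_merge_seating_layouts layouts → Pre_merge_seating_layouts layouts → Spec_merge_seating_layouts layouts (merge_seating_layouts layouts)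

-- ===== LEMMAS AND PROOFS =====

-- proof-only abbreviations for the nested-list types
abbrev PvSeat := List (String × Int)
abbrev PvCols := List (String × PvSeat)
abbrev PvLayout := List (String × PvCols)

-- the optional class id A extracts from one layout at one seat
def pvOpt3 (layout : PvLayout) (row col : String) : Option Int :=
  match pvLookup layout row with
  | none => none
  | some cols =>
    match pvLookup cols col with
    | none => none
    | some seat => pvLookup seat "class_id"

-- one seat's contribution to the vote stream
def pvTag (r c : String) (seat : PvSeat) : List ((String × String) × Int) :=
  match pvLookup seat "class_id" with
  | none => []
  | some cid => [((r, c), cid)]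

def pvFlat (layout : PvLayout) : List ((String × String) × Int) :=
  layout.flatMap (fun rc => rc.2.flatMap (fun cs => pvTag rc.1 cs.1 cs.2))

def pvStep (v : PySem.Dict (String × String) (PySem.Dict Int Int)) (p : (String × String) × Int) : PySem.Dict (String × String) (PySem.Dict Int Int) :=
  v.modify p.1 PySem.Dict.empty (fun c => c.modify p.2 0 (· + 1))

theorem pvVotes_eq_stream_fold (layouts : List PvLayout) :
    pvVotes layouts = (layouts.flatMap pvFlat).foldl pvStep PySem.Dict.empty := by
  rw [List.foldl_flatMap]
  unfold pvVotes
  congr 1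
  funext v layout
  unfold pvFlat
  rw [List.foldl_flatMap]
  congr 1
  funext v rc
  rw [List.foldl_flatMap]
  congr 1
  funext v cs
  unfold pvTag pvStep
  cases pvLookup cs.2 "class_id" <;> simp

theorem getD_foldl_pvStep (l : List ((String × String) × Int))
    (d : PySem.Dict (String × String) (PySem.Dict Int Int)) (k : String × String) :
    (l.foldl pvStep d).getD k PySem.Dict.empty
      = (l.filter (fun p => p.1 == k)).foldl (fun c p => c.modify p.2 0 (· + 1))
          (d.getD k PySem.Dict.empty) := by
  induction l generalizing d with
  | nil => rfl
  | cons p t ih =>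
    simp only [List.foldl_cons, List.filter_cons]
    by_cases h : p.1 = k
    · rw [ih]
      simp only [h, beq_self_eq_true, if_true, List.foldl_cons]
      congr 1
      unfold pvStep
      rw [h, PySem.Dict.getD_modify]
      simp
    · rw [ih]
      have hb : (p.1 == k) = false := beq_false_of_ne h
      simp only [hb, Bool.false_eq_true, if_false]
      congr 1
      unfold pvStep
      rw [PySem.Dict.getD_modify]
      simp [Ne.symm h]

theorem mem_colflat (r : String) (cols : PvCols) (p : (String × String) × Int)
    (hp : p ∈ cols.flatMap (fun cs => pvTag r cs.1 cs.2)) :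
    p.1.1 = r ∧ p.1.2 ∈ cols.map Prod.fst := by
  obtain ⟨cs, hcs, hpin⟩ := List.mem_flatMap.mp hp
  unfold pvTag at hpin
  cases h : pvLookup cs.2 "class_id" with
  | none => rw [h] at hpin; simp at hpin
  | some cid =>
    rw [h] at hpin
    simp at hpin
    rw [hpin]
    exact ⟨rfl, List.mem_map.mpr ⟨cs, hcs, rfl⟩⟩

theorem mem_pvFlat (L : PvLayout) (p : (String × String) × Int) (hp : p ∈ pvFlat L) :
    p.1.1 ∈ L.map Prod.fst := by
  unfold pvFlat at hp
  obtain ⟨rc, hrc, hpin⟩ := List.mem_flatMap.mp hp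
  have := mem_colflat rc.1 rc.2 p hpin
  exact List.mem_map.mpr ⟨rc, hrc, this.1.symm ▸ rfl⟩

theorem colflat_filter (row col : String) (cols : PvCols)
    (h : (cols.map Prod.fst).Nodup) :
    ((cols.flatMap (fun cs => pvTag row cs.1 cs.2)).filter (fun p => p.1 == (row, col))).map Prod.snd
      = (match pvLookup cols col with
         | none => none
         | some seat => pvLookup seat "class_id").toList := by
  induction cols with
  | nil => simp [pvLookup]
  | cons cs t ih =>
    simp only [List.map_cons, List.nodup_cons] at h
    simp only [List.flatMap_cons, List.filter_append, List.map_append]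
    by_cases hc : cs.1 = col
    · -- the matching column; the tail contributes nothing (col not among its keys)
      have htail : (t.flatMap (fun cs => pvTag row cs.1 cs.2)).filter (fun p => p.1 == (row, col)) = [] := by
        rw [List.filter_eq_nil_iff]
        intro p hp
        have h2 := (mem_colflat row t p hp).2
        simp only [beq_iff_eq]
        intro hpe
        apply h.1
        rw [hc]
        have hcc : p.1.2 = col := by rw [hpe]
        rwa [hcc] at h2
      rw [htail]
      unfold pvTag
      cases hcid : pvLookup cs.2 "class_id" with
      | none => simp [pvLookup, hc, hcid]
      | some cid => simp [pvLookup, hc, hcid]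
    · -- not the matching column: its tag is filtered out
      have hhead : (pvTag row cs.1 cs.2).filter (fun p => p.1 == (row, col)) = [] := by
        unfold pvTag
        cases pvLookup cs.2 "class_id" with
        | none => rfl
        | some cid => simp [hc]
      rw [hhead]
      simp only [List.map_nil, List.nil_append]
      rw [ih h.2]
      have hb : (cs.1 == col) = false := beq_false_of_ne hc
      simp [pvLookup, hb]

theorem pvFlat_filter (L : PvLayout) (row col : String)
    (hrows : (L.map Prod.fst).Nodup)
    (hcols : ∀ rc ∈ L, (rc.2.map Prod.fst).Nodup) :
    ((pvFlat L).filter (fun p => p.1 == (row, col))).map Prod.snd = (pvOpt3 L row col).toList := by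
  induction L with
  | nil => simp [pvFlat, pvOpt3, pvLookup]
  | cons rc t ih =>
    simp only [List.map_cons, List.nodup_cons] at hrows
    unfold pvFlat
    simp only [List.flatMap_cons, List.filter_append, List.map_append]
    by_cases hr : rc.1 = row
    · subst hr
      have htail : (pvFlat t).filter (fun p => p.1 == (rc.1, col)) = [] := by
        rw [List.filter_eq_nil_iff]
        intro p hp
        have h2 := mem_pvFlat t p hp
        simp only [beq_iff_eq]
        intro hpe
        apply hrows.1
        have hcc : p.1.1 = rc.1 := by rw [hpe]
        rwa [hcc] at h2
      unfold pvFlat at htail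
      rw [htail]
      rw [colflat_filter rc.1 col rc.2 (hcols rc List.mem_cons_self)]
      simp [pvOpt3, pvLookup]
    · have hhead : ((rc.2.flatMap (fun cs => pvTag rc.1 cs.1 cs.2)).filter (fun p => p.1 == (row, col))) = [] := by
        rw [List.filter_eq_nil_iff]
        intro p hp
        have h1 := (mem_colflat rc.1 rc.2 p hp).1
        simp only [beq_iff_eq]
        intro hpe
        apply hr
        have hcc : p.1.1 = row := by rw [hpe]
        rw [← hcc, h1]
      rw [hhead]
      simp only [List.map_nil, List.nil_append]
      have := ih hrows.2 (fun x hx => hcols x (List.mem_cons_of_mem _ hx))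
      unfold pvFlat at this
      rw [this]
      have hb : (rc.1 == row) = false := beq_false_of_ne hr
      simp [pvOpt3, pvLookup, hb]

theorem pvIds_eq_flatMap (layouts : List PvLayout) (row col : String) :
    pvIds layouts row col = layouts.flatMap (fun L => (pvOpt3 L row col).toList) := by
  unfold pvIds
  have hbody : ∀ (acc : List Int) (L : PvLayout),
      (match pvLookup L row with
       | none => acc
       | some cols =>
         match pvLookup cols col with
         | none => acc
         | some seat =>
           match pvLookup seat "class_id" with
           | none => acc
           | some cid => acc ++ [cid]) = acc ++ (pvOpt3 L row col).toList := by
    intro acc L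
    unfold pvOpt3
    cases h1 : pvLookup L row with
    | none => simp
    | some cols =>
      cases h2 : pvLookup cols col with
      | none => simp [h2]
      | some seat =>
        cases h3 : pvLookup seat "class_id" with
        | none => simp [h2, h3]
        | some cid => simp [h2, h3]
  exact (PySem.List.foldl_congr_mem _ _ _ _ (fun acc L _ => hbody acc L)).trans
    (by rw [PySem.List.foldl_append_eq_flatMap]; simp)

theorem stream_filter_eq_ids (layouts : List PvLayout) (row col : String)
    (hnd : ∀ layout ∈ layouts, (layout.map Prod.fst).Nodup ∧
       ∀ rc ∈ layout, (rc.2.map Prod.fst).Nodup ∧ ∀ cs ∈ rc.2, (cs.2.map Prod.fst).Nodup) :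
    ((layouts.flatMap pvFlat).filter (fun p => p.1 == (row, col))).map Prod.snd
      = pvIds layouts row col := by
  rw [pvIds_eq_flatMap]
  induction layouts with
  | nil => rfl
  | cons L t ih =>
    simp only [List.flatMap_cons, List.filter_append, List.map_append]
    rw [pvFlat_filter L row col (hnd L List.mem_cons_self).1
          (fun rc hrc => ((hnd L List.mem_cons_self).2 rc hrc).1),
        ih (fun x hx => hnd x (List.mem_cons_of_mem _ hx))]

theorem votes_getD (layouts : List PvLayout) (row col : String)
    (hnd : ∀ layout ∈ layouts, (layout.map Prod.fst).Nodup ∧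
       ∀ rc ∈ layout, (rc.2.map Prod.fst).Nodup ∧ ∀ cs ∈ rc.2, (cs.2.map Prod.fst).Nodup) :
    (pvVotes layouts).getD (row, col) PySem.Dict.empty
      = PySem.Dict.counter (pvIds layouts row col) := by
  rw [pvVotes_eq_stream_fold, getD_foldl_pvStep]
  rw [← stream_filter_eq_ids layouts row col hnd]
  rw [PySem.Dict.counter_eq_foldl, List.foldl_map]
  simp [PySem.Dict.getD_empty]

theorem votes_get?_none_iff (layouts : List PvLayout) (row col : String)
    (hnd : ∀ layout ∈ layouts, (layout.map Prod.fst).Nodup ∧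
       ∀ rc ∈ layout, (rc.2.map Prod.fst).Nodup ∧ ∀ cs ∈ rc.2, (cs.2.map Prod.fst).Nodup) :
    ((pvVotes layouts).get? (row, col) = none ↔ pvIds layouts row col = []) := by
  rw [pvVotes_eq_stream_fold]
  rw [PySem.Dict.get?_eq_none_iff_not_mem_keys]
  have hkeys : ((layouts.flatMap pvFlat).foldl pvStep PySem.Dict.empty).keys
      = PySem.Set.ofList ((layouts.flatMap pvFlat).map Prod.fst) := by
    unfold pvStep
    rw [PySem.Dict.keys_foldl_modify_key _ Prod.fst PySem.Dict.empty
          (fun _ p => fun c => c.modify p.2 0 (· + 1))]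
    rw [PySem.Dict.keys_empty, PySem.Set.update_nil_left]
  rw [hkeys, PySem.Set.mem_ofList]
  rw [← stream_filter_eq_ids layouts row col hnd]
  rw [List.map_eq_nil_iff, List.filter_eq_nil_iff]
  constructor
  · intro h p hp
    simp only [beq_iff_eq]
    intro hpe
    exact h (List.mem_map.mpr ⟨p, hp, hpe⟩)
  · intro h hmem
    obtain ⟨p, hp, hpe⟩ := List.mem_map.mp hmem
    have := h p hp
    simp only [beq_iff_eq] at this
    exact this hpe

theorem counter_size_ne_zero (ids : List Int) (h : ids ≠ []) :
    (PySem.Dict.counter ids).size ≠ 0 := by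
  have hít : (PySem.Dict.counter ids).items ≠ [] := by
    rw [PySem.Dict.items_counter]
    cases ids with
    | nil => exact absurd rfl h
    | cons a t =>
      intro hx
      rw [List.map_eq_nil_iff] at hx
      have ha : a ∈ PySem.Set.ofList (a :: t) := by
        rw [PySem.Set.mem_ofList]; exact List.mem_cons_self
      rw [hx] at ha
      exact absurd ha List.not_mem_nil
  intro hx
  exact hít (List.length_eq_zero_iff.mp hx)

-- ===== VERDICT (by name: the statement is the Claim_ definition above) =====
theorem merge_seating_layouts_spec : Claim_equal_merge_seating_layouts := by
  intro layouts _hdom hpre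
  unfold Spec_merge_seating_layouts
  obtain ⟨hnd, _hbase⟩ := hpre
  cases layouts with
  | nil => rfl
  | cons base rest =>
    unfold merge_seating_layouts merge_seating_layouts_alt
    apply PySem.List.foldl_congr_mem
    intro merged rc _hrc
    have hinner :
        rc.2.foldl (fun mrow cs =>
          let coords := (pvLookup cs.2 "coordinates").getD 0
          let classIds := pvIds (base :: rest) rc.1 cs.1
          let mostCommon :=
            if classIds ≠ [] then pvMostCommon1 (PySem.Dict.counter classIds)
            else (pvLookup cs.2 "class_id").getD 0
          mrow ++ [(cs.1, [("class_id", mostCommon), ("coordinates", coords)])]) []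
        = rc.2.foldl (fun mrow cs =>
          let mostCommon :=
            match (pvVotes (base :: rest)).get? (rc.1, cs.1) with
            | some ctr => if ctr.size ≠ 0 then pvMostCommon1 ctr else (pvLookup cs.2 "class_id").getD 0
            | none => (pvLookup cs.2 "class_id").getD 0
          mrow ++ [(cs.1, [("class_id", mostCommon), ("coordinates", (pvLookup cs.2 "coordinates").getD 0)])]) [] := by
      apply PySem.List.foldl_congr_mem
      intro mrow cs _hcs
      have hmc :
          (if pvIds (base :: rest) rc.1 cs.1 ≠ [] then
             pvMostCommon1 (PySem.Dict.counter (pvIds (base :: rest) rc.1 cs.1))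
           else (pvLookup cs.2 "class_id").getD 0)
          = (match (pvVotes (base :: rest)).get? (rc.1, cs.1) with
             | some ctr => if ctr.size ≠ 0 then pvMostCommon1 ctr else (pvLookup cs.2 "class_id").getD 0
             | none => (pvLookup cs.2 "class_id").getD 0) := by
        cases hv : (pvVotes (base :: rest)).get? (rc.1, cs.1) with
        | none =>
          have hids : pvIds (base :: rest) rc.1 cs.1 = [] :=
            (votes_get?_none_iff (base :: rest) rc.1 cs.1 hnd).mp hv
          simp [hids]
        | some ctr =>
          have hctr : ctr = PySem.Dict.counter (pvIds (base :: rest) rc.1 cs.1) := by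
            have hg := votes_getD (base :: rest) rc.1 cs.1 hnd
            rw [PySem.Dict.getD_eq_get?_getD, hv] at hg
            simpa using hg
          have hids : pvIds (base :: rest) rc.1 cs.1 ≠ [] := by
            intro hx
            rw [(votes_get?_none_iff (base :: rest) rc.1 cs.1 hnd).mpr hx] at hv
            exact Option.some_ne_none ctr hv.symm
          rw [hctr]
          simp [hids, counter_size_ne_zero _ hids]
      simp only []
      rw [hmc]
    rw [hinner]
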